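-- pv_equiv track=rewrite | github.com/PJYGit/FT | mod.py | sub_table
-- ===== SOURCE A (Python) =====
-- import math
--
-- def residue(num, mod):
--     # your code here
--     if not isinstance(mod, int) or int(mod) <= 0:
--         return 'Error (residue): Invalid mod'
--     if not isinstance(num, int):
--         return 'Error (residue): Invalid num'
--
--     q = math.floor(num / mod)
--     r = num - q * mod
--
--     return r
--
-- def sub_table(m):
--     # your code here
--     if not isinstance(m, int) or int(m) <= 0:
--         return 'Error (sub_table): Invalid mod'
--
--     S_table = []
--     for i in range(m):
--         row = []
--         for j in range(m):
--             row.append(residue(i - j, m))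
--
--         S_table.append(row)
--
--     return S_table
-- ===== SOURCE B (Python) =====
-- def sub_table(m):
--     # Circulant construction: row i is the base row [(-j) % m ...] rotated by (-i) % m.
--     if not isinstance(m, int) or int(m) <= 0:
--         return 'Error (sub_table): Invalid mod'
--     row0 = [(-j) % m for j in range(m)]
--     table = []
--     for i in range(m):
--         k = (-i) % m
--         table.append(row0[k:] + row0[:k])
--     return table
-- ===== Notes on version B (the rewrite author's own statement) =====
-- stated objective: faster
-- what changed: Replaces the nested loop that calls the residue helper m*m times with a circulant construction: one base row [(-j) % m] is built once and each row is a list rotation of it (row0[k:]+row0[:k], k = (-i) % m).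
-- outside the precondition, e.g. on sub_table(0): A returns 'Error (sub_table): Invalid mod', B returns 'Error (sub_table): Invalid mod'
import Mathlib
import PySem

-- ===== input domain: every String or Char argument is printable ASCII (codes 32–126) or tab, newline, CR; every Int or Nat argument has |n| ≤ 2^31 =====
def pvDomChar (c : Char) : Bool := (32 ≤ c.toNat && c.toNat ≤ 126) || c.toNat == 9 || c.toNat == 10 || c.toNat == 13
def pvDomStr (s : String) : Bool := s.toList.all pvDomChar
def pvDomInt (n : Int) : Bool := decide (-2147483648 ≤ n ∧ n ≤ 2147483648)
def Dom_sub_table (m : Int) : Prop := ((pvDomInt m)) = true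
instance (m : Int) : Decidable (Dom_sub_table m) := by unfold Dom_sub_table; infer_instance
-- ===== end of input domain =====

-- B builds the m×m subtraction table as a circulant: one base row, then per-row rotation (objective: faster, constant factor).

-- ===== PORT A =====
-- residue(num, mod): mod is always m > 0 and num an int here, so the guard branches never fire.
-- math.floor(num / mod) with float division equals floor division exactly for |num| ≤ 2^31, 1 ≤ mod ≤ 2^31
-- (the rounding error of the correctly-rounded double quotient is below 1/mod there).
def residuePort (num mod : Int) : Int :=
  let q := PySem.Int.floordiv num mod
  num - q * mod

def sub_table (m : Int) : List (List Int) :=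
  if m ≤ 0 then []  -- Python returns the error STRING here (not a list); outside Pre_
  else
    (PySem.List.pyRange 0 m 1).foldl (fun S i =>
      S ++ [(PySem.List.pyRange 0 m 1).foldl (fun row j => row ++ [residuePort (i - j) m]) []]) []

-- ===== PORT B =====
def sub_table_alt (m : Int) : List (List Int) :=
  if m ≤ 0 then []  -- Python returns the error STRING here (not a list); outside Pre_
  else
    let row0 := (PySem.List.pyRange 0 m 1).map (fun j => PySem.Int.mod (-j) m)
    (PySem.List.pyRange 0 m 1).foldl (fun t i =>
      t ++ [PySem.List.slice row0 (some (PySem.Int.mod (-i) m)) none ++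
            PySem.List.slice row0 none (some (PySem.Int.mod (-i) m))]) []

-- ===== PRECONDITION & SPEC =====
-- Pre_ excludes m ≤ 0, where the Python A returns an error string instead of a list of lists.
def Pre_sub_table (m : Int) : Prop := 0 < m
instance (m : Int) : Decidable (Pre_sub_table m) := by unfold Pre_sub_table; infer_instance
def pvWitness_sub_table : Int := (3)

def Spec_sub_table (m : Int) (out : List (List Int)) : Prop := out = sub_table_alt m
instance (m : Int) (out : List (List Int)) : Decidable (Spec_sub_table m out) := by unfold Spec_sub_table; infer_instance

-- ===== CLAIM (what is proved, stated in full; the proofs are below) =====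
def Claim_equal_sub_table : Prop := ∀ (m : Int), Dom_sub_table m → Pre_sub_table m → Spec_sub_table m (sub_table m)

-- ===== LEMMAS AND PROOFS =====

-- residue(num, m) is num % m (Python mod) for m > 0
lemma residuePort_eq_mod (num m : Int) : residuePort num m = PySem.Int.mod num m := by
  have h := PySem.Int.floordiv_mul_add_mod num m
  simp only [residuePort]
  omega

-- row i of A equals the rotated base row of B, for 0 ≤ i < m
lemma row_eq (m i : Int) (hm : 0 < m) (hi0 : 0 ≤ i) (him : i < m) :
    (PySem.List.pyRange 0 m 1).map (fun j => PySem.Int.mod (i - j) m) =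
    PySem.List.slice ((PySem.List.pyRange 0 m 1).map (fun j => PySem.Int.mod (-j) m))
        (some (PySem.Int.mod (-i) m)) none ++
    PySem.List.slice ((PySem.List.pyRange 0 m 1).map (fun j => PySem.Int.mod (-j) m))
        none (some (PySem.Int.mod (-i) m)) := by
  have hmod : ∀ a : Int, PySem.Int.mod a m = a % m := fun a => PySem.Int.mod_eq_emod_of_pos hm
  rcases eq_or_lt_of_le hi0 with h0 | h0
  · -- i = 0
    subst h0
    have h00 : PySem.Int.mod (-(0:Int)) m = ((0:Nat):Int) := by rw [hmod]; simp
    rw [h00, PySem.List.slice_from_natCast, PySem.List.slice_to_natCast]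
    simp
  · -- 0 < i
    have hr : PySem.Int.mod (-i) m = ((m - i).toNat : Int) := by
      rw [hmod]
      have h1 : (m - i) % m = (-i) % m := by
        have := Int.add_mul_emod_self_left (a := -i) (b := m) (c := 1)
        simpa using this.symm
      have h2 : (m - i) % m = m - i := Int.emod_eq_of_lt (by omega) (by omega)
      omega
    rw [hr, PySem.List.slice_from_natCast, PySem.List.slice_to_natCast]
    set k : Nat := (m - i).toNat with hk
    set row0 := (PySem.List.pyRange 0 m 1).map (fun j => PySem.Int.mod (-j) m) with hrow0
    have hlen0 : row0.length = m.toNat := by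
      simp [hrow0, PySem.List.length_pyRange_one]
    have hkn : k ≤ m.toNat := by omega
    apply List.ext_getElem
    · simp [PySem.List.length_pyRange_one, hlen0]; omega
    · intro j h1 h2
      have hjm : j < m.toNat := by simpa [PySem.List.length_pyRange_one] using h1
      have hrow0get : ∀ (t : Nat) (ht : t < m.toNat), row0[t]'(by omega) = (-(t : Int)) % m := by
        intro t ht
        simp [hrow0, hmod, PySem.List.pyRange_one]
      rw [List.getElem_map]
      rw [PySem.List.getElem_pyRange_one, hmod]
      by_cases hcase : j < m.toNat - k
      · rw [List.getElem_append_left (by simpa using by omega)]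
        rw [List.getElem_drop]
        rw [hrow0get (k + j) (by omega)]
        have : (-(↑(k + j) : Int)) = (i - (0 + j)) - m := by push_cast; omega
        rw [this, Int.sub_emod_right]
      · rw [List.getElem_append_right (by simpa using by omega)]
        simp only [List.length_drop, List.getElem_take, hlen0]
        rw [hrow0get (j - (m.toNat - k)) (by omega)]
        have : (-(↑(j - (m.toNat - k)) : Int)) = i - (0 + j) := by push_cast [hk]; omega
        rw [this]

theorem sub_table_spec : Claim_equal_sub_table := by
  unfold Claim_equal_sub_table
  intro m _ hpre
  have hm : 0 < m := hpre
  simp only [Spec_sub_table, sub_table, sub_table_alt, if_neg (by omega : ¬ m ≤ 0)]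
  rw [PySem.List.foldl_append_singleton_eq_map
        (f := fun i => (PySem.List.pyRange 0 m 1).foldl (fun row j => row ++ [residuePort (i - j) m]) []),
      PySem.List.foldl_append_singleton_eq_map]
  simp only [List.nil_append]
  apply List.map_congr_left
  intro i hi
  have hib := PySem.List.mem_pyRange_one.mp hi
  rw [PySem.List.foldl_append_singleton_eq_map (f := fun j => residuePort (i - j) m)]
  simp only [List.nil_append]
  have : (PySem.List.pyRange 0 m 1).map (fun j => residuePort (i - j) m)
       = (PySem.List.pyRange 0 m 1).map (fun j => PySem.Int.mod (i - j) m) := by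
    simp [residuePort_eq_mod]
  rw [this]
  exact row_eq m i hm hib.1 hib.2
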